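-- pv_equiv track=rewrite | github.com/PatrickSN/Ciencia_Computacao | INF/INF110/Portifolio/Lib/geradorSenha.py | cripto_compl
-- ===== SOURCE A (Python) =====
-- alfabeto = ['a', 'b', 'c', 'd', 'e', 'f', 'g', 'h', 'i', 'j', 'k', 'l',
--             'm', 'n', 'o', 'p', 'q', 'r', 's', 't', 'u', 'v', 'w', 'y', 'z']
--
-- numeros = ['1', '2', '3', '4', '5', '6', '7', '8', '9', '0']
--
-- simbolos = ['!', '@', '#', '$', '%', '&', '*', '_', '+', '-', ' ']
--
-- def cripto_compl(chave, lista_cripto):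
--     if chave == "A":
--         for i in range(0, len(alfabeto)):
--             if len(lista_cripto) > 24:
--                 break
--             if alfabeto[i] not in lista_cripto:
--                 lista_cripto += alfabeto[i]
--
--     elif chave == "N":
--         for i in range(0, len(numeros)):
--             if len(lista_cripto) > 24:
--                 break
--             if numeros[i] not in lista_cripto:
--                 lista_cripto += numeros[i]
--         for i in range(0, len(simbolos)):
--             if len(lista_cripto) > 24:
--                 break
--             if simbolos[i] not in lista_cripto:
--                 lista_cripto += simbolos[i]
--         for i in range(0, len(alfabeto)):
--             if len(lista_cripto) > 24:
--                 break
--             if alfabeto[i] not in lista_cripto: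
--                 lista_cripto += alfabeto[i]
--
--     elif chave == 'S':
--         for i in range(0, len(simbolos)):
--             if len(lista_cripto) > 24:
--                 break
--             if simbolos[i] not in lista_cripto:
--                 lista_cripto += simbolos[i]
--         for i in range(0, len(numeros)):
--             if len(lista_cripto) > 24:
--                 break
--             if numeros[i] not in lista_cripto:
--                 lista_cripto += numeros[i]
--         for i in range(0, len(alfabeto)):
--             if len(lista_cripto) > 24:
--                 break
--             if alfabeto[i] not in lista_cripto:
--                 lista_cripto += alfabeto[i]
--
--     return lista_cripto
-- ===== SOURCE B (Python) =====
-- alfabeto = ['a', 'b', 'c', 'd', 'e', 'f', 'g', 'h', 'i', 'j', 'k', 'l',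
--             'm', 'n', 'o', 'p', 'q', 'r', 's', 't', 'u', 'v', 'w', 'y', 'z']
--
-- numeros = ['1', '2', '3', '4', '5', '6', '7', '8', '9', '0']
--
-- simbolos = ['!', '@', '#', '$', '%', '&', '*', '_', '+', '-', ' ']
--
-- POOL = {"A": alfabeto, "N": numeros + simbolos + alfabeto, "S": simbolos + numeros + alfabeto}
--
-- def _fill(pool, seen, out, slots):
--     """Recursively consume the pool while slots remain, keeping a hash set of
--     characters already used so no rescans of the growing string are needed."""
--     if slots <= 0 or not pool:
--         return out
--     c = pool[0]
--     if c in seen: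
--         return _fill(pool[1:], seen, out, slots)
--     return _fill(pool[1:], seen | {c}, out + c, slots - 1)
--
-- def cripto_compl(chave, lista_cripto):
--     return _fill(POOL.get(chave, []), set(lista_cripto), lista_cripto, 25 - len(lista_cripto))
-- ===== Notes on version B (the rewrite author's own statement) =====
-- stated objective: simpler
-- what changed: Replaces the three mutating guarded loops that rescan the growing string and re-check its length with a dict-dispatched recursive pool consumer that carries a set of already-used characters and a remaining-slot countdown.
import Mathlib
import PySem

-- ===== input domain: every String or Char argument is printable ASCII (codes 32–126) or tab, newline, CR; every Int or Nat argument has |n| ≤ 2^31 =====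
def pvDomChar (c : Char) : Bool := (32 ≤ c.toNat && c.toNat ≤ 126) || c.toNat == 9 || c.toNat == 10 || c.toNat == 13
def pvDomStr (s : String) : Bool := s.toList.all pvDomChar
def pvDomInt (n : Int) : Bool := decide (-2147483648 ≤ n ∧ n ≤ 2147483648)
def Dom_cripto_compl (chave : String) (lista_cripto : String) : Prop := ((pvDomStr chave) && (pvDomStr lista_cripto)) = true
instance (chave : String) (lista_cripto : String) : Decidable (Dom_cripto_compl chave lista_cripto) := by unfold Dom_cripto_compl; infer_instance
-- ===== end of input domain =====

-- B replaces A's three mutating guarded loops (which rescan the growing string and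
-- re-test its length) by one recursive pool consumer carrying a hash set of used
-- characters and a remaining-slot countdown; objective: simpler.

-- module constants (shared by both sources)
def alfabetoL : List Char := ['a', 'b', 'c', 'd', 'e', 'f', 'g', 'h', 'i', 'j', 'k', 'l',
  'm', 'n', 'o', 'p', 'q', 'r', 's', 't', 'u', 'v', 'w', 'y', 'z']
def numerosL : List Char := ['1', '2', '3', '4', '5', '6', '7', '8', '9', '0']
def simbolosL : List Char := ['!', '@', '#', '$', '%', '&', '*', '_', '+', '-', ' ']

-- ===== PORT A =====
-- one guarded loop of A: for c in pool: break if len > 24; append c if not already in.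
-- `c in lista_cripto` with c a single character is exactly char membership in the string.
def cripto_loopA (pool : List Char) (acc : List Char) : List Char :=
  match pool with
  | [] => acc
  | c :: rest =>
    if acc.length > 24 then acc
    else if c ∈ acc then cripto_loopA rest acc
    else cripto_loopA rest (acc ++ [c])

def cripto_compl (chave : String) (lista_cripto : String) : String :=
  let l := lista_cripto.toList
  String.ofList
    (if chave = "A" then cripto_loopA alfabetoL l
     else if chave = "N" then cripto_loopA alfabetoL (cripto_loopA simbolosL (cripto_loopA numerosL l))
     else if chave = "S" then cripto_loopA alfabetoL (cripto_loopA numerosL (cripto_loopA simbolosL l))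
     else l)

-- ===== PORT B =====
-- POOL = {"A": alfabeto, "N": numeros+simbolos+alfabeto, "S": simbolos+numeros+alfabeto}
def poolDictB : PySem.Dict String (List Char) :=
  PySem.Dict.ofList [("A", alfabetoL), ("N", numerosL ++ simbolosL ++ alfabetoL), ("S", simbolosL ++ numerosL ++ alfabetoL)]

-- _fill: recursion over the pool with a set of used chars and a slot countdown
def fillB (pool : List Char) (seen : PySem.Set Char) (out : List Char) (slots : Int) : List Char :=
  if slots ≤ 0 then out
  else match pool with
  | [] => out
  | c :: rest =>
    if c ∈ seen then fillB rest seen out slots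
    else fillB rest (PySem.Set.add seen c) (out ++ [c]) (slots - 1)

def cripto_compl_alt (chave : String) (lista_cripto : String) : String :=
  let l := lista_cripto.toList
  String.ofList (fillB (PySem.Dict.getD poolDictB chave []) (PySem.Set.ofList l) l (25 - (l.length : Int)))

-- ===== PRECONDITION & SPEC =====
def Spec_cripto_compl (chave : String) (lista_cripto : String) (out : String) : Prop := out = cripto_compl_alt chave lista_cripto
instance (chave : String) (lista_cripto : String) (out : String) : Decidable (Spec_cripto_compl chave lista_cripto out) := by unfold Spec_cripto_compl; infer_instance

-- ===== CLAIM (what is proved, stated in full; the proofs are below) =====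
def Claim_equal_cripto_compl : Prop := ∀ (chave : String) (lista_cripto : String), Dom_cripto_compl chave lista_cripto → Spec_cripto_compl chave lista_cripto (cripto_compl chave lista_cripto)

-- ===== LEMMAS AND PROOFS =====

theorem cripto_loopA_append (p1 p2 : List Char) (acc : List Char) :
    cripto_loopA p2 (cripto_loopA p1 acc) = cripto_loopA (p1 ++ p2) acc := by
  induction p1 generalizing acc with
  | nil => rfl
  | cons c rest ih =>
    by_cases h : acc.length > 24
    · have : ∀ p a, a.length > 24 → cripto_loopA p a = a := by
        intro p a ha; cases p with
        | nil => rfl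
        | cons x xs => simp [cripto_loopA, ha]
      simp [cripto_loopA, h, this]
    · by_cases hc : c ∈ acc
      · simp [cripto_loopA, h, hc, ih]
      · simp [cripto_loopA, h, hc, ih]

-- fillB with the invariant (seen = chars of acc, slots = 25 - |acc|) computes A's loop
theorem fillB_eq_loopA (pool : List Char) (seen : PySem.Set Char) (acc : List Char)
    (slots : Int) (hseen : ∀ x, x ∈ seen ↔ x ∈ acc) (hslots : slots = 25 - (acc.length : Int)) :
    fillB pool seen acc slots = cripto_loopA pool acc := by
  induction pool generalizing seen acc slots with
  | nil =>
    cases h : decide (slots ≤ 0) <;> simp [fillB, cripto_loopA]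
  | cons c rest ih =>
    by_cases h : acc.length > 24
    · have hs : slots ≤ 0 := by omega
      simp [fillB, cripto_loopA, h, hs]
    · have hs : ¬ slots ≤ 0 := by omega
      by_cases hc : c ∈ acc
      · have hcs : c ∈ seen := (hseen c).mpr hc
        simp only [fillB, if_neg hs, if_pos hcs, cripto_loopA, if_neg h, if_pos hc]
        exact ih seen acc slots hseen hslots
      · have hcs : c ∉ seen := fun hm => hc ((hseen c).mp hm)
        simp only [fillB, if_neg hs, if_neg hcs, cripto_loopA, if_neg h, if_neg hc]
        refine ih _ _ _ ?_ ?_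
        · intro x
          rw [PySem.Set.mem_add]
          simp [hseen x, or_comm]
        · simp; omega

-- ===== VERDICT (by name: the statement is the Claim_ definition above) =====
theorem cripto_compl_spec : Claim_equal_cripto_compl := by
  intro chave lista _
  unfold Spec_cripto_compl cripto_compl cripto_compl_alt
  have hfill : ∀ pool : List Char,
      fillB pool (PySem.Set.ofList lista.toList) lista.toList (25 - (lista.toList.length : Int))
        = cripto_loopA pool lista.toList := by
    intro pool
    exact fillB_eq_loopA pool _ _ _ (fun x => by simp [PySem.Set.mem_ofList]) rfl
  by_cases hA : chave = "A"
  · subst hA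
    have hget : PySem.Dict.getD poolDictB "A" [] = alfabetoL := by decide
    simp only [hget, hfill, if_pos]
  · by_cases hN : chave = "N"
    · subst hN
      have hget : PySem.Dict.getD poolDictB "N" [] = numerosL ++ simbolosL ++ alfabetoL := by decide
      have hne : ("N" : String) ≠ "A" := by decide
      simp only [hget, hfill, cripto_loopA_append, if_neg hne, if_pos]
    · by_cases hS : chave = "S"
      · subst hS
        have hget : PySem.Dict.getD poolDictB "S" [] = simbolosL ++ numerosL ++ alfabetoL := by decide
        have hne1 : ("S" : String) ≠ "A" := by decide
        have hne2 : ("S" : String) ≠ "N" := by decide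
        simp only [hget, hfill, cripto_loopA_append, if_neg hne1, if_neg hne2, if_pos]
      · have hnone : poolDictB.get? chave = none := by
          rw [PySem.Dict.get?_eq_none_iff_not_mem_keys]
          rw [(by decide : poolDictB.keys = ["A", "N", "S"])]
          simp [hA, hN, hS]
        simp only [PySem.Dict.getD, hnone, Option.getD_none, if_neg hA, if_neg hN, if_neg hS]
        cases h : decide ((25 : Int) - (lista.toList.length : Int) ≤ 0) <;> simp [fillB]
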